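-- pv_equiv track=rewrite | github.com/cora1021/TreeLoss | experiments/real_world_data/tool.py | split_y
-- ===== SOURCE A (Python) =====
-- from collections import defaultdict
--
-- def split_y(y_pred,y_true,lang):
--     lang_truth = defaultdict(list)
--     for pred, y, l in zip(y_pred, y_true, lang):
--         lang_truth[l].append([pred, y])
--
--     for k, v in lang_truth.items():
--         pred, y = [], []
--         for line in v:
--             p, truth = line
--             pred.append(p)
--             y.append(truth)
--         lang_truth[k] = [pred, y]
--     return lang_truth
-- ===== SOURCE B (Python) =====
-- from collections import defaultdict
--
-- def split_y(y_pred, y_true, lang):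
--     lang_truth = defaultdict(list)
--     for pred, y, l in zip(y_pred, y_true, lang):
--         if l not in lang_truth:
--             lang_truth[l] = [[], []]
--         lang_truth[l][0].append(pred)
--         lang_truth[l][1].append(y)
--     return lang_truth
-- ===== Notes on version B (the rewrite author's own statement) =====
-- stated objective: simpler
-- what changed: B replaces A's two-phase algorithm (group rows into a dict of [pred, y] pairs, then a second loop transposing each group) with a single fused pass that maintains the two parallel lists per language directly, so the intermediate pair-lists and the transposition loop disappear.
import Mathlib
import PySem

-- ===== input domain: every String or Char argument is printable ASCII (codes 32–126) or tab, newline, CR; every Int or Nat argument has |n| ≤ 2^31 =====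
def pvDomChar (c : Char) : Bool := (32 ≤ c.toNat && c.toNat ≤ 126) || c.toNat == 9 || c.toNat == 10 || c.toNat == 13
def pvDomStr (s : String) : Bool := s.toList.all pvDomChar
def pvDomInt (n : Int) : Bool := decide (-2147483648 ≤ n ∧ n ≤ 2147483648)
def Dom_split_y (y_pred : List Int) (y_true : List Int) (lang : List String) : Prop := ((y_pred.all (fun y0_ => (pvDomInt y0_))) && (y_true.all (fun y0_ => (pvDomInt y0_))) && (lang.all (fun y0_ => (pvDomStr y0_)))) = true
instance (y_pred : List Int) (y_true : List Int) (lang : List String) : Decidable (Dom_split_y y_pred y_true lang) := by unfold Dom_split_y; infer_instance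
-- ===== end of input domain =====

-- B fuses A's build-then-transpose (group into [pred, y] pairs, then a second loop transposing
-- each group) into ONE pass that maintains the two parallel lists per language directly (objective: simpler).

-- ===== PORT A =====
-- inner loop of A's second pass: pred, y = [], []; for line in v: p, truth = line; appends.
-- (the `_ => acc` branch is unreachable: every line A stores is the two-element list [pred, y])
def pvTr (v : List (List Int)) : List Int × List Int :=
  v.foldl (fun acc line =>
    match line with
    | [p, truth] => (acc.1 ++ [p], acc.2 ++ [truth])
    | _ => acc) ([], [])

def split_y (y_pred : List Int) (y_true : List Int) (lang : List String) : List (String × List (List Int)) :=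
  -- lang_truth = defaultdict(list); for pred, y, l in zip(...): lang_truth[l].append([pred, y])
  let d1 := ((y_pred.zip y_true).zip lang).foldl
    (fun d pyl => d.modify pyl.2 [] (fun v => v ++ [[pyl.1.1, pyl.1.2]])) PySem.Dict.empty
  -- for k, v in lang_truth.items(): … ; lang_truth[k] = [pred, y]
  (d1.items.foldl (fun d kv => d.insert kv.1 [(pvTr kv.2).1, (pvTr kv.2).2]) d1).items

-- ===== PORT B =====
def split_y_alt (y_pred : List Int) (y_true : List Int) (lang : List String) : List (String × List (List Int)) :=
  -- one pass: if l not in lang_truth: lang_truth[l] = [[], []]; lang_truth[l][0].append(pred); lang_truth[l][1].append(y)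
  -- (the `_ => d` branch is unreachable: the value stored at l is always the two-element list [ps, ys])
  (((y_pred.zip y_true).zip lang).foldl
    (fun d pyl =>
      let d := if d.contains pyl.2 then d else d.insert pyl.2 [[], []]
      match d.getD pyl.2 [] with
      | [ps, ys] => d.insert pyl.2 [ps ++ [pyl.1.1], ys ++ [pyl.1.2]]
      | _ => d) PySem.Dict.empty).items

-- ===== PRECONDITION & SPEC =====
def Spec_split_y (y_pred : List Int) (y_true : List Int) (lang : List String) (out : List (String × List (List Int))) : Prop := out = split_y_alt y_pred y_true lang
instance (y_pred : List Int) (y_true : List Int) (lang : List String) (out : List (String × List (List Int))) : Decidable (Spec_split_y y_pred y_true lang out) := by unfold Spec_split_y; infer_instance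

-- ===== CLAIM (what is proved, stated in full; the proofs are below) =====
def Claim_equal_split_y : Prop := ∀ (y_pred : List Int) (y_true : List Int) (lang : List String), Dom_split_y y_pred y_true lang → Spec_split_y y_pred y_true lang (split_y y_pred y_true lang)

-- ===== LEMMAS AND PROOFS =====

-- pointwise value transform relating A's phase-1 dict to B's dict
def pvG (kv : String × List (List Int)) : String × List (List Int) :=
  (kv.1, [(pvTr kv.2).1, (pvTr kv.2).2])

theorem pvTr_append (v : List (List Int)) (p y : Int) :
    pvTr (v ++ [[p, y]]) = ((pvTr v).1 ++ [p], (pvTr v).2 ++ [y]) := by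
  simp [pvTr, List.foldl_append]

theorem contains_map_pvG (dA : PySem.Dict String (List (List Int))) (l : String) :
    (PySem.Dict.mk (dA.items.map pvG)).contains l = dA.contains l := by
  simp [PySem.Dict.contains, List.any_map, Function.comp_def, pvG]

-- one loop step of B on the transformed dict = transform of one loop step of A's first pass
theorem pvGetD_map (dA : PySem.Dict String (List (List Int))) (l : String) (v : List (List Int))
    (hv : dA.get? l = some v) :
    (PySem.Dict.mk (dA.items.map pvG)).getD l [] = [(pvTr v).1, (pvTr v).2] := by
  have hfind : dA.items.find? (fun q => q.1 == l) = some (l, v) := by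
    cases hf : dA.items.find? (fun q => q.1 == l) with
    | none => simp [PySem.Dict.get?, hf] at hv
    | some q =>
      obtain ⟨q1, q2⟩ := q
      have h1 : q1 = l := by have := List.find?_some hf; simpa using this
      have h2 : q2 = v := by simpa [PySem.Dict.get?, hf] using hv
      simp [h1, h2]
  have hcomp : ((fun q : String × List (List Int) => q.1 == l) ∘ pvG)
      = (fun q => q.1 == l) := by funext q; simp [pvG]
  simp [PySem.Dict.getD, PySem.Dict.get?, List.find?_map, hcomp, hfind, pvG]

-- overwriting an existing key on the transformed dict = transform of A appending to that key's group
theorem pvIns_old (dA : PySem.Dict String (List (List Int))) (l : String) (p y : Int)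
    (v : List (List Int)) (h : dA.contains l = true) (hv : dA.get? l = some v) :
    (PySem.Dict.mk (dA.items.map pvG)).insert l [(pvTr v).1 ++ [p], (pvTr v).2 ++ [y]]
      = PySem.Dict.mk ((dA.modify l [] (fun w => w ++ [[p, y]])).items.map pvG) := by
  have hc := contains_map_pvG dA l
  have hgA : dA.getD l [] = v := PySem.Dict.getD_of_get?_eq_some dA [] hv
  simp only [PySem.Dict.modify, hgA]
  simp only [PySem.Dict.insert, hc, h, if_true]
  congr 1
  simp only [List.map_map]
  apply List.map_congr_left
  intro q _
  by_cases hq : q.1 = l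
  · simp [pvG, hq, pvTr_append]
  · simp [pvG, hq]

-- a fresh key on the transformed dict = transform of A starting that key's group
theorem pvIns_new (dA : PySem.Dict String (List (List Int))) (l : String) (p y : Int)
    (h' : dA.contains l = false) :
    (PySem.Dict.mk (dA.items.map pvG)).insert l [[p], [y]]
      = PySem.Dict.mk ((dA.modify l [] (fun w => w ++ [[p, y]])).items.map pvG) := by
  have hc := contains_map_pvG dA l
  have hB : (PySem.Dict.mk (dA.items.map pvG)).contains l = false := hc.trans h'
  have hgA : dA.getD l [] = [] := PySem.Dict.getD_of_not_contains dA [] h'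
  simp only [PySem.Dict.modify, hgA]
  simp only [PySem.Dict.insert, hB, h', Bool.false_eq_true, if_false]
  simp [pvG, pvTr]

-- the whole of B's loop on the transformed dict = transform of the whole of A's first loop
theorem pvFold_comm (L : List ((Int × Int) × String)) :
    ∀ dA : PySem.Dict String (List (List Int)),
    (L.foldl (fun d pyl =>
        let d := if PySem.Dict.contains d pyl.2 then d else d.insert pyl.2 [[], []]
        match d.getD pyl.2 [] with
        | [ps, ys] => d.insert pyl.2 [ps ++ [pyl.1.1], ys ++ [pyl.1.2]]
        | _ => d)
      (PySem.Dict.mk (dA.items.map pvG)))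
    = PySem.Dict.mk ((L.foldl (fun d pyl => d.modify pyl.2 [] (fun v => v ++ [[pyl.1.1, pyl.1.2]])) dA).items.map pvG) := by
  induction L with
  | nil => intro dA; rfl
  | cons x L ih =>
    obtain ⟨⟨p, y⟩, l⟩ := x
    intro dA
    simp only [List.foldl_cons]
    have hc := contains_map_pvG dA l
    by_cases h : dA.contains l = true
    · obtain ⟨v, hv⟩ : ∃ v, dA.get? l = some v := by
        rw [PySem.Dict.contains_eq_isSome_get?] at h
        exact Option.isSome_iff_exists.mp h
      have hgB := pvGetD_map dA l v hv
      simp only [hc, h, if_true, hgB]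
      rw [pvIns_old dA l p y v h hv]
      exact ih _
    · have h' : dA.contains l = false := by simpa using h
      have hB : (PySem.Dict.mk (dA.items.map pvG)).contains l = false := hc.trans h'
      simp only [hc, h', Bool.false_eq_true, if_false, PySem.Dict.getD_insert_self,
        PySem.Dict.insert_insert_self, List.nil_append]
      rw [pvIns_new dA l p y h']
      exact ih _

-- A's second pass over a dict with nodup keys rewrites each entry's value in place
theorem pvFold2 (newv : String × List (List Int) → List (List Int)) :
    ∀ (L P : List (String × List (List Int))), ((P ++ L).map Prod.fst).Nodup →
    (L.foldl (fun d kv => d.insert kv.1 (newv kv)) (PySem.Dict.mk (P ++ L))).items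
      = P ++ L.map (fun kv => (kv.1, newv kv)) := by
  intro L
  induction L with
  | nil => intro P _; simp
  | cons kv L ih =>
    intro P hnd
    rw [List.map_append, List.map_cons] at hnd
    have hd := List.nodup_append.mp hnd
    have hPne : ∀ q ∈ P, q.1 ≠ kv.1 := fun q hq =>
      hd.2.2 q.1 (List.mem_map_of_mem hq) kv.1 (by simp)
    have hLne : ∀ q ∈ L, q.1 ≠ kv.1 := by
      have h2 := hd.2.1
      rw [List.nodup_cons] at h2
      intro q hq he
      exact h2.1 (he ▸ List.mem_map_of_mem hq)
    have hcont : (PySem.Dict.mk (P ++ kv :: L)).contains kv.1 = true := by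
      simp [PySem.Dict.contains]
    rw [List.foldl_cons]
    have hrepl : (P ++ kv :: L).map (fun q => if (q.1 == kv.1) = true then (kv.1, newv kv) else q)
        = P ++ (kv.1, newv kv) :: L := by
      simp only [List.map_append, List.map_cons]
      congr 1
      · have hid : ∀ q ∈ P, (if (q.1 == kv.1) = true then (kv.1, newv kv) else q) = q :=
          fun q hq => by simp [hPne q hq]
        rw [List.map_congr_left hid]; simp
      · have hid : ∀ q ∈ L, (if (q.1 == kv.1) = true then (kv.1, newv kv) else q) = q :=
          fun q hq => by simp [hLne q hq]
        rw [List.map_congr_left hid]; simp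
    have hstep : (PySem.Dict.mk (P ++ kv :: L)).insert kv.1 (newv kv)
        = PySem.Dict.mk (P ++ (kv.1, newv kv) :: L) := by
      simp only [PySem.Dict.insert, hcont, if_true]
      exact congrArg PySem.Dict.mk hrepl
    rw [hstep, List.append_cons]
    rw [ih (P ++ [(kv.1, newv kv)]) (by simpa using hnd)]
    simp

theorem split_y_eq (y_pred : List Int) (y_true : List Int) (lang : List String) :
    split_y y_pred y_true lang = split_y_alt y_pred y_true lang := by
  unfold split_y split_y_alt
  set L := (y_pred.zip y_true).zip lang with hL
  set d1 := L.foldl (fun d pyl => d.modify pyl.2 [] (fun v => v ++ [[pyl.1.1, pyl.1.2]])) PySem.Dict.empty with hd1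
  have hnd : (d1.items.map Prod.fst).Nodup := by
    have := PySem.Dict.nodup_keys_foldl_modify_key L (fun pyl => pyl.2) []
      (fun _ pyl => (fun v => v ++ [[pyl.1.1, pyl.1.2]])) PySem.Dict.empty
      PySem.Dict.nodup_keys_empty
    simpa [PySem.Dict.keys] using this
  have hA : (d1.items.foldl (fun d kv => d.insert kv.1 [(pvTr kv.2).1, (pvTr kv.2).2]) d1).items
      = d1.items.map pvG := by
    have := pvFold2 (fun kv => [(pvTr kv.2).1, (pvTr kv.2).2]) d1.items [] (by simpa using hnd)
    simpa [pvG] using this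
  have hB := pvFold_comm L PySem.Dict.empty
  simp only [show (PySem.Dict.empty : PySem.Dict String (List (List Int))).items.map pvG = ([] : List (String × List (List Int))) from rfl] at hB
  rw [hA]
  exact (congrArg PySem.Dict.items hB).symm

-- ===== VERDICT (by name: the statement is the Claim_ definition above) =====
theorem split_y_spec : Claim_equal_split_y := by
  intro y_pred y_true lang _
  unfold Spec_split_y
  exact split_y_eq y_pred y_true lang
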